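-- pv_equiv track=rewrite | github.com/Jesanchezz/API_Escala_Musical_Flask | musical_scale_module/MusicalScale.py | create_major_scale
-- ===== SOURCE A (Python) =====
-- def create_major_scale(accommodated_scale):
--     new_major_scale = []
--
--     for i in range(len(accommodated_scale)):
--         if (i%2==0 and i<=4):
--             new_major_scale.append(accommodated_scale[i])
--         elif (i%2!=0 and i>4):
--             new_major_scale.append(accommodated_scale[i])
--
--     return new_major_scale
-- ===== SOURCE B (Python) =====
-- def create_major_scale(accommodated_scale):
--     return accommodated_scale[0:5:2] + accommodated_scale[5::2]
-- ===== Notes on version B (the rewrite author's own statement) =====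
-- stated objective: idiomatic
-- what changed: Replaces the per-index loop with parity/threshold branches by the concatenation of two extended slices, [0:5:2] and [5::2].
import Mathlib
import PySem

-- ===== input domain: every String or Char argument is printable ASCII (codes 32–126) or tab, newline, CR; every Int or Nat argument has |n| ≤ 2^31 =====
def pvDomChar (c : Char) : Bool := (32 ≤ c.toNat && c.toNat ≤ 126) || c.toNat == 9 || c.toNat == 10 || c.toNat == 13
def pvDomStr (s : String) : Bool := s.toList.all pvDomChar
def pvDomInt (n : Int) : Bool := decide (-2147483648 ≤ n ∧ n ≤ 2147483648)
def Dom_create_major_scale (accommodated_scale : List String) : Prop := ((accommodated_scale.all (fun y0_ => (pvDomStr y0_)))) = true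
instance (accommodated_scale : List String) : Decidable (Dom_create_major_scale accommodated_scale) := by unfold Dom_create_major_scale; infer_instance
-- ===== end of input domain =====

-- B replaces the per-index loop with parity/threshold branches by the concatenation of
-- two extended slices, xs[0:5:2] ++ xs[5::2] (objective: more idiomatic).

-- ===== PORT A =====
-- literal port of A: loop over range(len(xs)), append on the two branch conditions.
-- xs[i] with i drawn from range(len(xs)) is always in range, so '.getD ""' is never the default.
def create_major_scale (accommodated_scale : List String) : List String :=
  (PySem.List.pyRange 0 (accommodated_scale.length : Int) 1).foldl
    (fun new_major_scale i =>
      if i % 2 = 0 ∧ i ≤ 4 then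
        new_major_scale ++ [(PySem.List.pyGet? accommodated_scale i).getD ""]
      else if i % 2 ≠ 0 ∧ 4 < i then
        new_major_scale ++ [(PySem.List.pyGet? accommodated_scale i).getD ""]
      else new_major_scale) []

-- ===== PORT B =====
-- literal port of B: xs[0:5:2] + xs[5::2]; slice? never returns none for step 2.
def create_major_scale_alt (accommodated_scale : List String) : List String :=
  ((PySem.List.slice? accommodated_scale (some 0) (some 5) 2).getD []) ++
  ((PySem.List.slice? accommodated_scale (some 5) none 2).getD [])

-- ===== PRECONDITION & SPEC =====
def Spec_create_major_scale (accommodated_scale : List String) (out : List String) : Prop := out = create_major_scale_alt accommodated_scale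
instance (accommodated_scale : List String) (out : List String) : Decidable (Spec_create_major_scale accommodated_scale out) := by unfold Spec_create_major_scale; infer_instance

-- ===== CLAIM (what is proved, stated in full; the proofs are below) =====
def Claim_equal_create_major_scale : Prop := ∀ (accommodated_scale : List String), Dom_create_major_scale accommodated_scale → Spec_create_major_scale accommodated_scale (create_major_scale accommodated_scale)

-- ===== LEMMAS AND PROOFS =====

-- common midpoint: every other element, starting with the first
def pvEvens {α : Type} : List α → List α
  | [] => []
  | [a] => [a]
  | a :: _ :: t => a :: pvEvens t

-- the Nat predicate of A's two branch conditions
def pvP (k : Nat) : Bool := (k % 2 == 0 && k ≤ 4) || (k % 2 == 1 && 4 < k)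

theorem pvEV {α : Type} : (ys : List α) →
    (List.range ((ys.length + 1) / 2)).filterMap (fun k => ys[2 * k]?) = pvEvens ys
  | [] => by simp [pvEvens]
  | [a] => by simp [pvEvens, List.range_succ]
  | a :: b :: t => by
      have ih := pvEV t
      have hlen : ((a :: b :: t).length + 1) / 2 = (t.length + 1) / 2 + 1 := by
        simp; omega
      rw [hlen, List.range_succ_eq_map, List.filterMap_cons, List.filterMap_map]
      simp only [pvEvens]
      have h0 : (a :: b :: t)[2 * 0]? = some a := rfl
      rw [h0]
      show a :: _ = a :: _
      have hcong : List.filterMap ((fun k => (a :: b :: t)[2 * k]?) ∘ Nat.succ)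
          (List.range ((t.length + 1) / 2)) = List.filterMap (fun k => t[2 * k]?)
          (List.range ((t.length + 1) / 2)) := by
        apply List.filterMap_congr
        intro k _
        show (a :: b :: t)[2 * Nat.succ k]? = t[2 * k]?
        have h2 : 2 * Nat.succ k = 2 * k + 1 + 1 := by omega
        rw [h2]
        simp
      rw [hcong, ih]
  termination_by ys => ys.length

theorem pvEVD {α : Type} (d : α) : (ys : List α) →
    ((List.range ys.length).filter (fun k => k % 2 == 0)).map (fun k => (ys[k]?).getD d) = pvEvens ys
  | [] => by simp [pvEvens]
  | [a] => by simp [pvEvens]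
  | a :: b :: t => by
      have ih := pvEVD d t
      have hl : (a :: b :: t).length = t.length + 1 + 1 := by simp
      rw [hl, List.range_succ_eq_map, List.range_succ_eq_map]
      simp only [List.map_cons, List.map_map, List.filter_cons]
      norm_num
      rw [List.filter_map, List.map_map]
      have hcong : List.map ((fun k => (a :: b :: t)[k]?.getD d) ∘ (Nat.succ ∘ Nat.succ))
          (List.filter ((fun k => k % 2 == 0) ∘ (Nat.succ ∘ Nat.succ)) (List.range t.length)) =
          List.map (fun k => t[k]?.getD d) (List.filter (fun k => k % 2 == 0) (List.range t.length)) := by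
        have hp : ((fun k => k % 2 == 0) ∘ (Nat.succ ∘ Nat.succ)) = (fun k : Nat => k % 2 == 0) := by
          funext k
          simp [Function.comp, Nat.succ_mod_two_eq_zero_iff]
          omega
        rw [hp]
        apply List.map_congr_left
        intro k _
        show (a :: b :: t)[k + 1 + 1]?.getD d = t[k]?.getD d
        simp
      rw [hcong, ih]
      rfl
  termination_by ys => ys.length

theorem pvA1 (xs : List String) :
    create_major_scale xs =
      ((List.range xs.length).filter pvP).map (fun k => (xs[k]?).getD "") := by
  unfold create_major_scale
  rw [PySem.List.pyRange_zero_natCast, List.foldl_map]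
  have hbody : (fun (acc : List String) (k : Nat) =>
      if (k : Int) % 2 = 0 ∧ (k : Int) ≤ 4 then
        acc ++ [(PySem.List.pyGet? xs (k : Int)).getD ""]
      else if (k : Int) % 2 ≠ 0 ∧ 4 < (k : Int) then
        acc ++ [(PySem.List.pyGet? xs (k : Int)).getD ""]
      else acc) =
      (fun acc k => if pvP k = true then acc ++ [(xs[k]?).getD ""] else acc) := by
    funext acc k
    by_cases h1 : ((k : Int) % 2 = 0 ∧ (k : Int) ≤ 4)
    · have hp : pvP k = true := by simp [pvP]; omega
      rw [if_pos h1, hp]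
      simp
    · by_cases h2 : ((k : Int) % 2 ≠ 0 ∧ 4 < (k : Int))
      · have hp : pvP k = true := by simp [pvP]; omega
        rw [if_neg h1, if_pos h2, hp]
        simp
      · have hp : pvP k = false := by simp [pvP]; omega
        rw [if_neg h1, if_neg h2, hp]
        simp
  rw [hbody, PySem.List.foldl_append_if]
  simp

theorem pvSlice1 (xs : List String) :
    PySem.List.slice? xs (some 0) (some 5) 2 = some (pvEvens (xs.take 5)) := by
  simp only [PySem.List.slice?, PySem.List.sliceIndices]
  norm_num
  rw [← pvEV (xs.take 5)]
  have hlen : (xs.take 5).length = min 5 xs.length := by simp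
  rw [hlen]
  have hc : (if 0 < xs.length then ((min 5 (xs.length : Int) + 2 - 1) / 2).toNat else 0) =
      (min 5 xs.length + 1) / 2 := by
    split_ifs with h <;> omega
  rw [hc]
  apply List.filterMap_congr
  intro k hk
  rw [List.mem_range] at hk
  have h2 : ((2 * (k : Int)).toNat) = 2 * k := by omega
  rw [h2, List.getElem?_take, if_pos (by omega)]

theorem pvSlice2 (xs : List String) :
    PySem.List.slice? xs (some 5) none 2 = some (pvEvens (xs.drop 5)) := by
  simp only [PySem.List.slice?, PySem.List.sliceIndices]
  norm_num
  rw [← pvEV (xs.drop 5)]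
  have hlen : (xs.drop 5).length = xs.length - 5 := by simp
  rw [hlen]
  have hc : (if 5 < xs.length then (((xs.length : Int) - min 5 (xs.length : Int) + 2 - 1) / 2).toNat else 0) =
      (xs.length - 5 + 1) / 2 := by
    split_ifs with h <;> omega
  rw [hc]
  apply List.filterMap_congr
  intro k hk
  rw [List.mem_range] at hk
  have h2 : ((min 5 (xs.length : Int) + 2 * (k : Int)).toNat) = 5 + 2 * k := by omega
  rw [h2, List.getElem?_drop]

theorem pvB1 (xs : List String) :
    create_major_scale_alt xs = pvEvens (xs.take 5) ++ pvEvens (xs.drop 5) := by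
  unfold create_major_scale_alt
  rw [pvSlice1, pvSlice2]
  rfl

theorem pvA2 (xs : List String) :
    ((List.range xs.length).filter pvP).map (fun k => (xs[k]?).getD "") =
      pvEvens (xs.take 5) ++ pvEvens (xs.drop 5) := by
  match xs with
  | [] => rfl
  | [a] => rfl
  | [a, b] => rfl
  | [a, b, c] => simp [List.range_succ, pvP, pvEvens]
  | [a, b, c, d] => simp [List.range_succ, pvP, pvEvens]
  | a :: b :: c :: d :: e :: t =>
    have hn : (a :: b :: c :: d :: e :: t).length = 5 + t.length := by simp; omega
    rw [hn, List.range_add, List.filter_append, List.map_append]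
    congr 1
    rw [List.filter_map, List.map_map]
    have hp : (pvP ∘ (5 + ·)) = (fun k : Nat => k % 2 == 0) := by
      funext k
      simp only [pvP, Function.comp]
      have h2 : (5 + k) % 2 = (k + 1) % 2 := by omega
      rw [h2]
      rcases Nat.mod_two_eq_zero_or_one k with h | h <;> simp [Nat.add_mod, h] <;> omega
    rw [hp]
    have hg : List.map ((fun k => (a :: b :: c :: d :: e :: t)[k]?.getD "") ∘ (5 + ·))
        (List.filter (fun k : Nat => k % 2 == 0) (List.range t.length)) =
        List.map (fun k => t[k]?.getD "") (List.filter (fun k : Nat => k % 2 == 0) (List.range t.length)) := by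
      apply List.map_congr_left
      intro k _
      show (a :: b :: c :: d :: e :: t)[5 + k]?.getD "" = t[k]?.getD ""
      have h5 : 5 + k = k + 1 + 1 + 1 + 1 + 1 := by omega
      rw [h5]
      simp
    rw [hg, pvEVD]
    rfl

-- ===== VERDICT (by name: the statement is the Claim_ definition above) =====
theorem create_major_scale_spec : Claim_equal_create_major_scale := by
  intro xs _
  show create_major_scale xs = create_major_scale_alt xs
  rw [pvA1, pvA2, pvB1]
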